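-- pv_equiv track=rewrite | github.com/caijos83/Image_escalier | reconnaissanceEscalier.py | get_rectangle_from_lines
-- ===== SOURCE A (Python) =====
-- def get_rectangle_from_lines(lines):
--     """
--     Génére un quadrilatère (presque rectangle) à partir des lignes détectées sur les escaliers.
--     """
--     points = []
--     for line in lines:
--         x1, y1, x2, y2 = line[0]
--         points.append((x1, y1))
--         points.append((x2, y2))
--
--     # Trier les points par Y (du plus haut au plus bas)
--     points = sorted(points, key=lambda p: p[1])
--
--     # Prendre les points les plus hauts (haut gauche et droit)
--     top_points = sorted(points[:10], key=lambda p: p[0])  # 10 plus hauts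
--     top_left = top_points[0]
--     top_right = top_points[-1]
--
--     # Prendre les points les plus bas (bas gauche et droit)
--     bottom_points = sorted(points[-10:], key=lambda p: p[0])  # 10 plus bas
--     bottom_left = bottom_points[0]
--     bottom_right = bottom_points[-1]
--
--     return [top_left, top_right, bottom_right, bottom_left]
-- ===== SOURCE B (Python) =====
-- def _insert(buf, p):
--     # stable insertion by y: place p before the first element with strictly larger y
--     k = 0
--     while k < len(buf) and buf[k][1] <= p[1]:
--         k += 1
--     return buf[:k] + [p] + buf[k:]
--
--
-- def get_rectangle_from_lines(lines):
--     """
--     Génére un quadrilatère (presque rectangle) à partir des lignes détectées sur les escaliers.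
--     Single streaming pass with two bounded buffers (no global sort): 'low' keeps the up-to-10
--     lowest-Y points seen so far and 'high' the up-to-10 highest-Y points, each in stable Y-order;
--     the corners are then picked by lexicographic (x, y) min/max selection over the buffers.
--     """
--     low = []
--     high = []
--     for line in lines:
--         x1, y1, x2, y2 = line[0]
--         for p in ((x1, y1), (x2, y2)):
--             low = _insert(low, p)
--             if len(low) > 10:
--                 low = low[:10]
--             high = _insert(high, p)
--             if len(high) > 10:
--                 high = high[1:]
--     lex = lambda q: (q[0], q[1])
--     top_left = min(low, key=lex)
--     top_right = max(low, key=lex)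
--     bottom_left = min(high, key=lex)
--     bottom_right = max(high, key=lex)
--     return [top_left, top_right, bottom_right, bottom_left]
-- ===== Notes on version B (the rewrite author's own statement) =====
-- stated objective: alternative
-- what changed: B never builds or sorts the full point list: in one streaming pass over the lines it maintains two bounded insertion buffers (the up-to-10 lowest-Y and up-to-10 highest-Y points seen so far, each in stable Y-order) and then picks each corner by lexicographic (x,y) min/max selection over a buffer, replacing A's global sort by Y, the [:10]/[-10:] slices and the per-slice sorts by X; Pre_ only excludes inputs where A raises (empty lines list, or a line whose inner list is empty), and B raises there too.
import Mathlib
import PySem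

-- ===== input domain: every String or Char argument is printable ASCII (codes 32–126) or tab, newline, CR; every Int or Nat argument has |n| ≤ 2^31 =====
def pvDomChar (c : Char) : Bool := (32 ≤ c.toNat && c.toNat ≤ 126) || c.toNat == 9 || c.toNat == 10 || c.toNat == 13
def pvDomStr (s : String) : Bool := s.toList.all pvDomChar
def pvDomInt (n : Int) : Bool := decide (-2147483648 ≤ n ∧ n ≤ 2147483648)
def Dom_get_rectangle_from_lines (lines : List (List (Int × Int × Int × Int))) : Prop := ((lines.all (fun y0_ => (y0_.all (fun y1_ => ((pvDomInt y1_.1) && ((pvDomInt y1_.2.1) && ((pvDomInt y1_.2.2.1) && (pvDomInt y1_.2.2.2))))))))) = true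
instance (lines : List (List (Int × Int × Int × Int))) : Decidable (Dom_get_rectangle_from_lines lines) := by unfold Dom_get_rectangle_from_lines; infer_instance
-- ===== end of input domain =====

-- B replaces A's global sort-by-Y + slicing + per-slice sort-by-X by ONE streaming pass that
-- maintains two bounded (≤ 10 element) insertion buffers of the lowest-/highest-Y points and
-- picks each corner by lexicographic (x, y) min/max selection (objective: alternative).

-- ===== PORT A =====
-- 'x1, y1, x2, y2 = line[0]' raises IndexError on an empty line; pyGetD's default is only
-- reached outside Pre_ (which requires every line nonempty).
def get_rectangle_from_lines (lines : List (List (Int × Int × Int × Int))) : List (Int × Int) :=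
  let points : List (Int × Int) := lines.foldl (fun acc line =>
    let q := PySem.List.pyGetD line 0 (0, 0, 0, 0)
    (acc ++ [(q.1, q.2.1)]) ++ [(q.2.2.1, q.2.2.2)]) []
  let points := PySem.List.sorted points (fun p => p.2) false
  let top_points := PySem.List.sorted (PySem.List.slice points none (some 10)) (fun p => p.1) false
  let top_left := PySem.List.pyGetD top_points 0 (0, 0)       -- top_points[0]: IndexError outside Pre_
  let top_right := PySem.List.pyGetD top_points (-1) (0, 0)
  let bottom_points := PySem.List.sorted (PySem.List.slice points (some (-10)) none) (fun p => p.1) false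
  let bottom_left := PySem.List.pyGetD bottom_points 0 (0, 0)
  let bottom_right := PySem.List.pyGetD bottom_points (-1) (0, 0)
  [top_left, top_right, bottom_right, bottom_left]

-- ===== PORT B =====
-- Source B's _insert: stable insertion by y (the while loop scanning past elements with y ≤ p.y
-- becomes the structural recursion over the buffer; exact on all inputs).
def pvInsert (buf : List (Int × Int)) (p : Int × Int) : List (Int × Int) :=
  match buf with
  | [] => [p]
  | q :: t => if q.2 ≤ p.2 then q :: pvInsert t p else p :: q :: t

-- the body of Source B's inner 'for p in …' loop: insert into both buffers, trim each to 10
def pvStep (lh : List (Int × Int) × List (Int × Int)) (p : Int × Int) :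
    List (Int × Int) × List (Int × Int) :=
  let low := pvInsert lh.1 p
  let low := if low.length > 10 then low.take 10 else low
  let high := pvInsert lh.2 p
  let high := if high.length > 10 then high.drop 1 else high
  (low, high)

-- min/max over an empty buffer raise ValueError in Python; '.getD' defaults are only reached
-- outside Pre_.
def get_rectangle_from_lines_alt (lines : List (List (Int × Int × Int × Int))) : List (Int × Int) :=
  let lh := lines.foldl (fun lh line =>
    let q := PySem.List.pyGetD line 0 (0, 0, 0, 0)
    [(q.1, q.2.1), (q.2.2.1, q.2.2.2)].foldl pvStep lh) ([], [])
  let low := lh.1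
  let high := lh.2
  let top_left := (PySem.List.min2? low Prod.fst Prod.snd).getD (0, 0)
  let top_right := (PySem.List.max2? low Prod.fst Prod.snd).getD (0, 0)
  let bottom_left := (PySem.List.min2? high Prod.fst Prod.snd).getD (0, 0)
  let bottom_right := (PySem.List.max2? high Prod.fst Prod.snd).getD (0, 0)
  [top_left, top_right, bottom_right, bottom_left]

-- ===== PRECONDITION & SPEC =====
-- Pre_ excludes exactly the inputs on which the Python A raises: an empty lines list
-- (IndexError indexing the empty slice) and any line whose list is empty (IndexError on line[0]).
def Pre_get_rectangle_from_lines (lines : List (List (Int × Int × Int × Int))) : Prop :=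
  lines ≠ [] ∧ ∀ l ∈ lines, l ≠ []
instance (lines : List (List (Int × Int × Int × Int))) : Decidable (Pre_get_rectangle_from_lines lines) := by unfold Pre_get_rectangle_from_lines; infer_instance

def pvWitness_get_rectangle_from_lines : (List (List (Int × Int × Int × Int))) :=
  [[(0, 0, 4, 1)], [(2, 3, 5, 2)]]

def Spec_get_rectangle_from_lines (lines : List (List (Int × Int × Int × Int))) (out : List (Int × Int)) : Prop := out = get_rectangle_from_lines_alt lines
instance (lines : List (List (Int × Int × Int × Int))) (out : List (Int × Int)) : Decidable (Spec_get_rectangle_from_lines lines out) := by unfold Spec_get_rectangle_from_lines; infer_instance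

-- ===== CLAIM (what is proved, stated in full; the proofs are below) =====
def Claim_equal_get_rectangle_from_lines : Prop := ∀ (lines : List (List (Int × Int × Int × Int))), Dom_get_rectangle_from_lines lines → Pre_get_rectangle_from_lines lines → Spec_get_rectangle_from_lines lines (get_rectangle_from_lines lines)

-- ===== LEMMAS AND PROOFS =====

-- ---- part 1: the streaming buffers equal take 10 / last 10 of the insertion sort by Y ----

theorem pv_insert_eq_insertBy (buf : List (Int × Int)) (p : Int × Int) :
    pvInsert buf p = PySem.List.insertBy (fun a b => decide (a.2 < b.2)) p buf := by
  induction buf with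
  | nil => rfl
  | cons q t ih =>
    simp only [pvInsert, PySem.List.insertBy]
    by_cases h : q.2 ≤ p.2
    · have h2 : ¬ (decide (p.2 < q.2) = true) := by simp; omega
      simp [h, h2, ih]
    · have h2 : (decide (p.2 < q.2) = true) := by simp; omega
      simp [h, h2]

theorem pv_insert_length (buf : List (Int × Int)) (p : Int × Int) :
    (pvInsert buf p).length = buf.length + 1 := by
  induction buf with
  | nil => rfl
  | cons q t ih => simp only [pvInsert]; split_ifs <;> simp [ih]

theorem pv_insert_pairwise (buf : List (Int × Int)) (p : Int × Int)
    (h : buf.Pairwise (fun a b => a.2 ≤ b.2)) :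
    (pvInsert buf p).Pairwise (fun a b => a.2 ≤ b.2) := by
  induction buf with
  | nil => simp [pvInsert]
  | cons q t ih =>
    rcases List.pairwise_cons.mp h with ⟨hq, ht⟩
    simp only [pvInsert]
    split_ifs with hle
    · refine List.pairwise_cons.mpr ⟨?_, ih ht⟩
      intro z hz
      rw [pv_insert_eq_insertBy] at hz
      rcases (PySem.List.mem_insertBy _ _ _ _).mp hz with rfl | hz
      · exact hle
      · exact hq z hz
    · refine List.pairwise_cons.mpr ⟨?_, h⟩
      intro z hz
      rcases List.mem_cons.mp hz with rfl | hz
      · omega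
      · have := hq z hz; omega

theorem pv_insert_of_forall_lt (buf : List (Int × Int)) (p : Int × Int)
    (h : ∀ b ∈ buf, p.2 < b.2) : pvInsert buf p = p :: buf := by
  cases buf with
  | nil => rfl
  | cons q t =>
    have : ¬ q.2 ≤ p.2 := by have := h q (by simp); omega
    simp [pvInsert, this]

-- trimming commutes with insertion: only the first n slots matter for take n
theorem pv_take_insert (n : Nat) (s : List (Int × Int)) (p : Int × Int) :
    (pvInsert s p).take n = (pvInsert (s.take n) p).take n := by
  induction s generalizing n with
  | nil => simp
  | cons q t ih =>
    cases n with
    | zero => simp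
    | succ m =>
      simp only [pvInsert, List.take_succ_cons]
      split_ifs with h
      · simp only [List.take_succ_cons]
        rw [ih m]
      · simp only [List.take_succ_cons]
        cases m with
        | zero => simp
        | succ k =>
          simp [List.take_succ_cons, List.take_take]

-- the last-n window: drop all but the last n elements
def pvLastN (n : Nat) (l : List (Int × Int)) : List (Int × Int) := l.drop (l.length - n)

theorem pv_lastN_cons (n : Nat) (q : Int × Int) (l : List (Int × Int)) (h : n ≤ l.length) :
    pvLastN n (q :: l) = pvLastN n l := by
  simp only [pvLastN, List.length_cons]
  have e : l.length + 1 - n = (l.length - n) + 1 := by omega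
  rw [e, List.drop_succ_cons]

theorem pv_lastN_of_le (n : Nat) (l : List (Int × Int)) (h : l.length ≤ n) :
    pvLastN n l = l := by
  simp [pvLastN, Nat.sub_eq_zero_of_le h]

theorem pv_lastN_insert (n : Nat) (s : List (Int × Int)) (p : Int × Int)
    (hs : s.Pairwise (fun a b => a.2 ≤ b.2)) :
    pvLastN n (pvInsert s p) = pvLastN n (pvInsert (pvLastN n s) p) := by
  induction s with
  | nil => simp [pvLastN]
  | cons q t ih =>
    by_cases hlen : (q :: t).length ≤ n
    · rw [pv_lastN_of_le n _ hlen]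
    · have htn : n ≤ t.length := by simp at hlen; omega
      rcases List.pairwise_cons.mp hs with ⟨hq, ht⟩
      simp only [pvInsert]
      split_ifs with h
      · -- p goes to the right of q: the window never contains q
        have h1 : n ≤ (pvInsert t p).length := by rw [pv_insert_length]; omega
        rw [pv_lastN_cons n q _ h1, pv_lastN_cons n q t htn, ih ht]
      · -- p is strictly below everything: it falls off the left edge of the window
        have hp : ∀ b ∈ q :: t, p.2 < b.2 := by
          intro b hb
          rcases List.mem_cons.mp hb with rfl | hb
          · omega
          · have := hq b hb; omega
        have hwin : ∀ b ∈ pvLastN n (q :: t), p.2 < b.2 := by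
          intro b hb
          exact hp b (List.mem_of_mem_drop hb)
        rw [pv_insert_of_forall_lt _ _ hwin]
        have hlw : (pvLastN n (q :: t)).length = n := by
          simp only [pvLastN, List.length_drop, List.length_cons]
          omega
        rw [pv_lastN_cons n p _ (le_of_eq hlw.symm),
            pv_lastN_of_le n _ (le_of_eq hlw),
            pv_lastN_cons n p _ (by simp; omega)]

-- the streaming loop maintains low = take 10, high = last 10 of the insertion-sorted prefix
theorem pv_inv (ps : List (Int × Int)) (S : List (Int × Int))
    (hs : S.Pairwise (fun a b => a.2 ≤ b.2)) :
    ps.foldl pvStep (S.take 10, pvLastN 10 S)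
      = ((ps.foldl (fun acc x => pvInsert acc x) S).take 10,
         pvLastN 10 (ps.foldl (fun acc x => pvInsert acc x) S)) := by
  induction ps generalizing S with
  | nil => rfl
  | cons p ps ih =>
    simp only [List.foldl_cons]
    have hstep : pvStep (S.take 10, pvLastN 10 S) p
        = ((pvInsert S p).take 10, pvLastN 10 (pvInsert S p)) := by
      have hlow : (if (pvInsert (S.take 10) p).length > 10
            then (pvInsert (S.take 10) p).take 10 else pvInsert (S.take 10) p)
          = (pvInsert S p).take 10 := by
        rw [pv_take_insert 10 S p]
        by_cases hc : (pvInsert (S.take 10) p).length > 10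
        · rw [if_pos hc]
        · rw [if_neg hc]
          exact (List.take_of_length_le (by omega)).symm
      have hhigh : (if (pvInsert (pvLastN 10 S) p).length > 10
            then (pvInsert (pvLastN 10 S) p).drop 1 else pvInsert (pvLastN 10 S) p)
          = pvLastN 10 (pvInsert S p) := by
        rw [pv_lastN_insert 10 S p hs]
        have hll : (pvInsert (pvLastN 10 S) p).length = (pvLastN 10 S).length + 1 :=
          pv_insert_length _ _
        have hw : (pvLastN 10 S).length ≤ 10 := by
          simp only [pvLastN, List.length_drop]; omega
        by_cases hc : (pvInsert (pvLastN 10 S) p).length > 10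
        · rw [if_pos hc]
          generalize hg : pvInsert (pvLastN 10 S) p = l at hc hll ⊢
          simp only [pvLastN]
          have h1 : l.length - 10 = 1 := by omega
          rw [h1]
        · rw [if_neg hc]
          exact (pv_lastN_of_le 10 (pvInsert (pvLastN 10 S) p) (by omega)).symm
      simp only [pvStep]
      exact Prod.ext hlow hhigh
    rw [hstep, ih _ (pv_insert_pairwise S p hs)]

-- fold over a flattened list = nested folds
theorem pv_foldl_flatMap {α β γ : Type} (f : α → List β) (g : γ → β → γ)
    (l : List α) (init : γ) :
    l.foldl (fun acc x => (f x).foldl g acc) init = (l.flatMap f).foldl g init := by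
  induction l generalizing init with
  | nil => rfl
  | cons a l ih => simp [List.flatMap_cons, List.foldl_append, ih]

-- ---- part 2: A's sorted-by-X [0]/[-1] equal B's lexicographic min/max selection ----

-- step functions describing head?/getLast? of the insertion sort by the first component
def pvHStep (h : Option (Int × Int)) (x : Int × Int) : Option (Int × Int) :=
  match h with | none => some x | some m => if x.1 < m.1 then some x else some m
def pvLStep (h : Option (Int × Int)) (x : Int × Int) : Option (Int × Int) :=
  match h with | none => some x | some m => if x.1 < m.1 then some m else some x

theorem pv_head?_insertBy (x : Int × Int) (ys : List (Int × Int)) :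
    (PySem.List.insertBy (fun a b => decide (a.1 < b.1)) x ys).head? = pvHStep ys.head? x := by
  cases ys with
  | nil => rfl
  | cons y ys =>
    simp only [PySem.List.insertBy, pvHStep]
    split_ifs <;> simp_all

theorem pv_foldl_insert_head (s : List (Int × Int)) (acc : List (Int × Int)) :
    (s.foldl (fun acc x => PySem.List.insertBy (fun a b => decide (a.1 < b.1)) x acc) acc).head?
      = s.foldl pvHStep acc.head? := by
  induction s generalizing acc with
  | nil => rfl
  | cons a s ih =>
    simp only [List.foldl_cons]
    rw [ih, pv_head?_insertBy]

theorem pv_insertBy_ne_nil (x : Int × Int) (ys : List (Int × Int)) :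
    PySem.List.insertBy (fun a b => decide (a.1 < b.1)) x ys ≠ [] := by
  cases ys with
  | nil => simp [PySem.List.insertBy]
  | cons y ys => simp only [PySem.List.insertBy]; split_ifs <;> simp

theorem pv_pairwise_insertBy (x : Int × Int) (ys : List (Int × Int))
    (h : ys.Pairwise (fun a b => a.1 ≤ b.1)) :
    (PySem.List.insertBy (fun a b => decide (a.1 < b.1)) x ys).Pairwise (fun a b => a.1 ≤ b.1) := by
  induction ys with
  | nil => simp [PySem.List.insertBy]
  | cons y ys ih =>
    simp only [PySem.List.insertBy]
    rcases List.pairwise_cons.mp h with ⟨hy, hys⟩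
    split_ifs with hlt
    · have hxy : x.1 < y.1 := by simpa using hlt
      refine List.pairwise_cons.mpr ⟨?_, h⟩
      intro z hz
      rcases List.mem_cons.mp hz with rfl | hz
      · omega
      · have := hy z hz; omega
    · have hxy : ¬ x.1 < y.1 := by simpa using hlt
      refine List.pairwise_cons.mpr ⟨?_, ih hys⟩
      intro z hz
      rcases (PySem.List.mem_insertBy _ _ _ _).mp hz with rfl | hz
      · omega
      · exact hy z hz

theorem pv_getLast?_insertBy (x : Int × Int) (ys : List (Int × Int))
    (h : ys.Pairwise (fun a b => a.1 ≤ b.1)) :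
    (PySem.List.insertBy (fun a b => decide (a.1 < b.1)) x ys).getLast? = pvLStep ys.getLast? x := by
  induction ys with
  | nil => simp [PySem.List.insertBy, pvLStep]
  | cons y ys ih =>
    rcases List.pairwise_cons.mp h with ⟨hy, hys⟩
    simp only [PySem.List.insertBy]
    split_ifs with hlt
    · have hxy : x.1 < y.1 := by simpa using hlt
      cases hlast : (y :: ys).getLast? with
      | none => simp [List.getLast?_cons] at hlast
      | some m =>
        have hm : m ∈ y :: ys := List.mem_of_getLast? hlast
        have hym : y.1 ≤ m.1 := by
          rcases List.mem_cons.mp hm with rfl | hm'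
          · omega
          · exact hy m hm'
        have hxm : x.1 < m.1 := by omega
        simp [List.getLast?_cons, hlast, pvLStep, hxm]
    · have hxy : ¬ x.1 < y.1 := by simpa using hlt
      cases ys with
      | nil => simp [PySem.List.insertBy, pvLStep, hxy]
      | cons z zs =>
        have hne := pv_insertBy_ne_nil x (z :: zs)
        cases hl : (z :: zs).getLast? with
        | none => simp [List.getLast?_cons] at hl
        | some m =>
          rw [List.getLast?_cons, ih hys, hl]
          simp only [List.getLast?_cons, hl, pvLStep, Option.getD_some]
          split_ifs <;> rfl

theorem pv_foldl_insert_last (s : List (Int × Int)) (acc : List (Int × Int))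
    (h : acc.Pairwise (fun a b => a.1 ≤ b.1)) :
    (s.foldl (fun acc x => PySem.List.insertBy (fun a b => decide (a.1 < b.1)) x acc) acc).getLast?
      = s.foldl pvLStep acc.getLast? := by
  induction s generalizing acc with
  | nil => rfl
  | cons a s ih =>
    simp only [List.foldl_cons]
    rw [ih _ (pv_pairwise_insertBy a acc h), pv_getLast?_insertBy a acc h]

-- the sorted-by-X head/last of a list, as folds
theorem pv_sorted_head (s : List (Int × Int)) :
    (PySem.List.sorted s (fun p => p.1) false).head? = s.foldl pvHStep none := by
  rw [PySem.List.sorted_eq_foldl_insertBy]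
  exact pv_foldl_insert_head s []

theorem pv_sorted_last (s : List (Int × Int)) :
    (PySem.List.sorted s (fun p => p.1) false).getLast? = s.foldl pvLStep none := by
  rw [PySem.List.sorted_eq_foldl_insertBy]
  exact pv_foldl_insert_last s [] (by simp)

-- min2?/max2?'s fold steps, and their agreement with pvHStep/pvLStep when the
-- accumulated element precedes the new one in Y
def pvMinStep (acc : Option (Int × Int)) (x : Int × Int) : Option (Int × Int) :=
  match acc with
  | none => some x
  | some m => if (decide (x.1 < m.1) || !decide (m.1 < x.1) && decide (x.2 < m.2)) = true
              then some x else some m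
def pvMaxStep (acc : Option (Int × Int)) (x : Int × Int) : Option (Int × Int) :=
  match acc with
  | none => some x
  | some m => if (decide (m.1 < x.1) || !decide (x.1 < m.1) && decide (m.2 < x.2)) = true
              then some x else some m

theorem pv_min2_def (s : List (Int × Int)) :
    PySem.List.min2? s Prod.fst Prod.snd = s.foldl pvMinStep none := by
  unfold PySem.List.min2? pvMinStep
  congr 1
  funext acc x
  cases acc <;> rfl
theorem pv_max2_def (s : List (Int × Int)) :
    PySem.List.max2? s Prod.fst Prod.snd = s.foldl pvMaxStep none := by
  unfold PySem.List.max2? pvMaxStep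
  congr 1
  funext acc x
  cases acc <;> rfl

theorem pv_minstep_eq (m0 : Option (Int × Int)) (a : Int × Int)
    (h : ∀ m, m0 = some m → m.2 ≤ a.2) : pvMinStep m0 a = pvHStep m0 a := by
  cases m0 with
  | none => rfl
  | some m =>
    have hma := h m rfl
    have h2 : ¬ a.2 < m.2 := by omega
    simp only [pvMinStep, pvHStep, h2]
    by_cases h1 : a.1 < m.1 <;> simp [h1]

theorem pv_maxstep_eq (m0 : Option (Int × Int)) (a : Int × Int)
    (h : ∀ m, m0 = some m → m.2 ≤ a.2) : pvMaxStep m0 a = pvLStep m0 a := by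
  cases m0 with
  | none => rfl
  | some m =>
    have hma := h m rfl
    simp only [pvMaxStep, pvLStep]
    rcases lt_trichotomy a.1 m.1 with h1 | h1 | h1
    · have h1' : ¬ m.1 < a.1 := by omega
      simp [h1, h1']
    · by_cases h2 : m.2 < a.2
      · simp [h1, h2]
      · have hme : m = a := by
          cases m; cases a
          simp_all
          omega
        simp [h1, hme]
    · have h1' : ¬ a.1 < m.1 := by omega
      simp [h1, h1']

theorem pv_hstep_inv (m0 : Option (Int × Int)) (a : Int × Int)
    (h : ∀ m, m0 = some m → m.2 ≤ a.2) (m : Int × Int) (hm : pvHStep m0 a = some m) :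
    m = a ∨ m0 = some m := by
  cases m0 with
  | none => simp only [pvHStep] at hm; exact Or.inl (Option.some.inj hm).symm
  | some m' =>
    simp only [pvHStep] at hm
    split_ifs at hm
    · exact Or.inl (Option.some.inj hm).symm
    · exact Or.inr (by rw [Option.some.inj hm])

theorem pv_lstep_inv (m0 : Option (Int × Int)) (a : Int × Int)
    (m : Int × Int) (hm : pvLStep m0 a = some m) :
    m = a ∨ m0 = some m := by
  cases m0 with
  | none => simp only [pvLStep] at hm; exact Or.inl (Option.some.inj hm).symm
  | some m' =>
    simp only [pvLStep] at hm
    split_ifs at hm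
    · exact Or.inr (by rw [Option.some.inj hm])
    · exact Or.inl (Option.some.inj hm).symm

theorem pv_min2_eq_hfold (s : List (Int × Int)) (m0 : Option (Int × Int))
    (hinv : ∀ m, m0 = some m → ∀ x ∈ s, m.2 ≤ x.2)
    (hp : s.Pairwise (fun a b => a.2 ≤ b.2)) :
    s.foldl pvMinStep m0 = s.foldl pvHStep m0 := by
  induction s generalizing m0 with
  | nil => rfl
  | cons a s ih =>
    rcases List.pairwise_cons.mp hp with ⟨ha, hs⟩
    simp only [List.foldl_cons]
    have hstep : ∀ m, m0 = some m → m.2 ≤ a.2 := fun m hm => hinv m hm a (by simp)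
    rw [pv_minstep_eq m0 a hstep]
    refine ih _ (fun m hm x hx => ?_) hs
    rcases pv_hstep_inv m0 a hstep m hm with rfl | hm0
    · exact ha x hx
    · exact hinv m hm0 x (by simp [hx])

theorem pv_max2_eq_lfold (s : List (Int × Int)) (m0 : Option (Int × Int))
    (hinv : ∀ m, m0 = some m → ∀ x ∈ s, m.2 ≤ x.2)
    (hp : s.Pairwise (fun a b => a.2 ≤ b.2)) :
    s.foldl pvMaxStep m0 = s.foldl pvLStep m0 := by
  induction s generalizing m0 with
  | nil => rfl
  | cons a s ih =>
    rcases List.pairwise_cons.mp hp with ⟨ha, hs⟩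
    simp only [List.foldl_cons]
    have hstep : ∀ m, m0 = some m → m.2 ≤ a.2 := fun m hm => hinv m hm a (by simp)
    rw [pv_maxstep_eq m0 a hstep]
    refine ih _ (fun m hm x hx => ?_) hs
    rcases pv_lstep_inv m0 a m hm with rfl | hm0
    · exact ha x hx
    · exact hinv m hm0 x (by simp [hx])

-- per-slice corner lemma: on a nonempty Y-sorted list, A's sorted-by-X [0]/[-1]
-- equal B's lexicographic min/max selection
theorem pv_corner_min (s : List (Int × Int)) (hne : s ≠ [])
    (hp : s.Pairwise (fun a b => a.2 ≤ b.2)) :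
    PySem.List.pyGetD (PySem.List.sorted s (fun p => p.1) false) 0 (0, 0)
      = (PySem.List.min2? s Prod.fst Prod.snd).getD (0, 0) := by
  have hmin : PySem.List.min2? s Prod.fst Prod.snd = s.foldl pvHStep none := by
    rw [pv_min2_def]; exact pv_min2_eq_hfold s none (by intro m hm; cases hm) hp
  have hhead := pv_sorted_head s
  have hne' : PySem.List.sorted s (fun p => p.1) false ≠ [] := by
    intro h; exact hne ((PySem.List.sorted_eq_nil_iff _ _ _).mp h)
  cases ht : PySem.List.sorted s (fun p => p.1) false with
  | nil => exact absurd ht hne'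
  | cons a t =>
    rw [ht] at hhead
    simp only [List.head?_cons] at hhead
    rw [hmin, ← hhead]
    simp [PySem.List.pyGetD]

theorem pv_corner_max (s : List (Int × Int)) (_hne : s ≠ [])
    (hp : s.Pairwise (fun a b => a.2 ≤ b.2)) :
    PySem.List.pyGetD (PySem.List.sorted s (fun p => p.1) false) (-1) (0, 0)
      = (PySem.List.max2? s Prod.fst Prod.snd).getD (0, 0) := by
  have hmax : PySem.List.max2? s Prod.fst Prod.snd = s.foldl pvLStep none := by
    rw [pv_max2_def]; exact pv_max2_eq_lfold s none (by intro m hm; cases hm) hp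
  have hlast := pv_sorted_last s
  rw [hmax, ← hlast]
  simp [PySem.List.pyGetD, PySem.List.pyGet?_neg_one]

-- ---- part 3: assembly ----

-- A's appended point list equals the flattened point list B streams over
theorem pv_points_eq (lines : List (List (Int × Int × Int × Int))) :
    lines.foldl (fun acc line =>
        let q := PySem.List.pyGetD line 0 (0, 0, 0, 0)
        (acc ++ [(q.1, q.2.1)]) ++ [(q.2.2.1, q.2.2.2)]) []
      = lines.flatMap (fun line =>
        let q := PySem.List.pyGetD line 0 (0, 0, 0, 0)
        [(q.1, q.2.1), (q.2.2.1, q.2.2.2)]) := by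
  have : (fun (acc : List (Int × Int)) (line : List (Int × Int × Int × Int)) =>
        let q := PySem.List.pyGetD line 0 (0, 0, 0, 0)
        (acc ++ [(q.1, q.2.1)]) ++ [(q.2.2.1, q.2.2.2)])
      = (fun acc line =>
        acc ++ (fun line =>
          let q := PySem.List.pyGetD line 0 (0, 0, 0, 0)
          [(q.1, q.2.1), (q.2.2.1, q.2.2.2)]) line) := by
    funext acc line; simp
  rw [this, PySem.List.foldl_append_eq_flatMap]
  simp

-- B's nested fold, flattened and rewritten as take/lastN of the insertion sort by Y
theorem pv_alt_buffers (pts : List (Int × Int)) :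
    pts.foldl pvStep ([], [])
      = ((PySem.List.sorted pts (fun p => p.2) false).take 10,
         pvLastN 10 (PySem.List.sorted pts (fun p => p.2) false)) := by
  have hsort : PySem.List.sorted pts (fun p => p.2) false
      = pts.foldl (fun acc x => pvInsert acc x) [] := by
    rw [PySem.List.sorted_eq_foldl_insertBy]
    congr 1
    funext acc x
    rw [pv_insert_eq_insertBy]
  rw [hsort]
  exact pv_inv pts [] (by simp)

-- assembled: A's corner list over the sliced sort equals B's selections over the buffers
theorem pv_main (pts : List (Int × Int)) (hne : pts ≠ [])
    (hpw : pts.Pairwise (fun a b => a.2 ≤ b.2)) :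
    [PySem.List.pyGetD (PySem.List.sorted (PySem.List.slice pts none (some 10)) (fun p => p.1) false) 0 (0, 0),
     PySem.List.pyGetD (PySem.List.sorted (PySem.List.slice pts none (some 10)) (fun p => p.1) false) (-1) (0, 0),
     PySem.List.pyGetD (PySem.List.sorted (PySem.List.slice pts (some (-10)) none) (fun p => p.1) false) (-1) (0, 0),
     PySem.List.pyGetD (PySem.List.sorted (PySem.List.slice pts (some (-10)) none) (fun p => p.1) false) 0 (0, 0)]
    = [(PySem.List.min2? (pts.take 10) Prod.fst Prod.snd).getD (0, 0),
       (PySem.List.max2? (pts.take 10) Prod.fst Prod.snd).getD (0, 0),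
       (PySem.List.max2? (pvLastN 10 pts) Prod.fst Prod.snd).getD (0, 0),
       (PySem.List.min2? (pvLastN 10 pts) Prod.fst Prod.snd).getD (0, 0)] := by
  have htop : PySem.List.slice pts none (some 10) = pts.take 10 := by
    rw [PySem.List.slice_to (xs := pts) (show (0:Int) ≤ 10 by norm_num)]; rfl
  have hbot : PySem.List.slice pts (some (-10)) none = pvLastN 10 pts := by
    rw [PySem.List.slice_from_neg_ofNat pts 10 (by norm_num)]; rfl
  have htopne : pts.take 10 ≠ [] := by
    simp [List.take_eq_nil_iff, hne]
  have hbotne : pvLastN 10 pts ≠ [] := by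
    have : 0 < pts.length := List.length_pos_iff.mpr hne
    simp only [pvLastN, ne_eq, List.drop_eq_nil_iff]
    omega
  have htoppw : (pts.take 10).Pairwise (fun a b => a.2 ≤ b.2) :=
    List.Pairwise.sublist (List.take_sublist _ _) hpw
  have hbotpw : (pvLastN 10 pts).Pairwise (fun a b => a.2 ≤ b.2) :=
    List.Pairwise.sublist (List.drop_sublist _ _) hpw
  rw [htop, hbot,
      pv_corner_min _ htopne htoppw, pv_corner_max _ htopne htoppw,
      pv_corner_min _ hbotne hbotpw, pv_corner_max _ hbotne hbotpw]

-- ===== VERDICT (by name: the statement is the Claim_ definition above) =====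
theorem get_rectangle_from_lines_spec : Claim_equal_get_rectangle_from_lines := by
  intro lines _ hpre
  unfold Spec_get_rectangle_from_lines get_rectangle_from_lines get_rectangle_from_lines_alt
  rw [pv_points_eq, pv_foldl_flatMap, pv_alt_buffers]
  have hne : PySem.List.sorted (lines.flatMap (fun line =>
        let q := PySem.List.pyGetD line 0 (0, 0, 0, 0)
        [(q.1, q.2.1), (q.2.2.1, q.2.2.2)])) (fun p => p.2) false ≠ [] := by
    intro h
    have h' := (PySem.List.sorted_eq_nil_iff _ _ _).mp h
    rcases lines with _ | ⟨l, ls⟩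
    · exact hpre.1 rfl
    · simp at h'
  exact pv_main _ hne (PySem.List.sorted_pairwise _ _)
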